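-- pv_equiv track=rewrite | github.com/ayecampero/TP_Final_Phyton | clases_y_metodos.py | intervalos_vacios
-- ===== SOURCE A (Python) =====
-- def intervalos_vacios(indices):
--   intervalos_vacios = []
--   intervalos_vacios.append(indices[0])
--   for k in range(len(indices)-1):
--     if indices[k+1] != indices[k]+1:
--       intervalos_vacios.append(indices[k])
--       intervalos_vacios.append(indices[k+1])
--   intervalos_vacios.append(indices[-1])
--   return intervalos_vacios
-- ===== SOURCE B (Python) =====
-- def intervalos_vacios(indices):
--     # Partition into maximal consecutive runs, then emit each run's endpoints.
--     runs = []
--     cur = []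
--     for x in indices:
--         if cur and x == cur[-1] + 1:
--             cur.append(x)
--         else:
--             if cur:
--                 runs.append(cur)
--             cur = [x]
--     if cur:
--         runs.append(cur)
--     return [v for r in runs for v in (r[0], r[-1])]
-- ===== Notes on version B (the rewrite author's own statement) =====
-- stated objective: alternative
-- what changed: B partitions the input into maximal consecutive runs and emits each run's first and last element, instead of A's index loop that compares adjacent positions and appends around each gap.
import Mathlib
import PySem

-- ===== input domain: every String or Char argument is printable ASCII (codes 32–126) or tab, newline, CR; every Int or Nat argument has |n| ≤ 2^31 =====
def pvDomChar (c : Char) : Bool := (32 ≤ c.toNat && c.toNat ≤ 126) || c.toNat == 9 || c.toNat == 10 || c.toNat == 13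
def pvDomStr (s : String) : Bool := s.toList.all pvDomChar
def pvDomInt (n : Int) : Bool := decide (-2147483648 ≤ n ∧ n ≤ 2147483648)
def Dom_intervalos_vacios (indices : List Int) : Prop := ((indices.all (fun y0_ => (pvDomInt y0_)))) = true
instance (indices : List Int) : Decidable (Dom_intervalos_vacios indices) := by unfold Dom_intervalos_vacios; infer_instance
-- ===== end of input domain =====

-- B re-decomposes A: it partitions the input into maximal consecutive runs and emits each
-- run's endpoints, instead of A's index loop comparing adjacent positions (objective: alternative).

-- ===== PORT A =====
def intervalos_vacios (indices : List Int) : List Int :=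
  let iv : List Int := [] ++ [PySem.List.pyGetD indices 0 0]
  let iv := (PySem.List.pyRange 0 ((indices.length : Int) - 1) 1).foldl
    (fun acc k =>
      if PySem.List.pyGetD indices (k + 1) 0 ≠ PySem.List.pyGetD indices k 0 + 1 then
        acc ++ [PySem.List.pyGetD indices k 0, PySem.List.pyGetD indices (k + 1) 0]
      else acc) iv
  iv ++ [PySem.List.pyGetD indices (-1) 0]

-- ===== PORT B =====
-- one loop step of Source B: extend the current run or close it and start a new one
def pvIvStep (st : List (List Int) × List Int) (x : Int) : List (List Int) × List Int :=
  if !st.2.isEmpty && x == st.2.getLastD 0 + 1 then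
    (st.1, st.2 ++ [x])
  else
    ((if st.2.isEmpty then st.1 else st.1 ++ [st.2]), [x])

def intervalos_vacios_alt (indices : List Int) : List Int :=
  let st := indices.foldl pvIvStep ([], [])
  let runs := if st.2.isEmpty then st.1 else st.1 ++ [st.2]
  -- every run in `runs` is nonempty, so r[0] = headD and r[-1] = getLastD are exact
  runs.flatMap (fun r => [r.headD 0, r.getLastD 0])

-- ===== PRECONDITION & SPEC =====
-- A raises IndexError on the empty list (indices[0]); Pre_ excludes exactly that input (B returns [] there).
def Pre_intervalos_vacios (indices : List Int) : Prop := indices ≠ []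
instance (indices : List Int) : Decidable (Pre_intervalos_vacios indices) := by
  unfold Pre_intervalos_vacios; infer_instance
def pvWitness_intervalos_vacios : List Int := [1, 2, 5]

def Spec_intervalos_vacios (indices : List Int) (out : List Int) : Prop :=
  out = intervalos_vacios_alt indices
instance (indices : List Int) (out : List Int) : Decidable (Spec_intervalos_vacios indices out) := by
  unfold Spec_intervalos_vacios; infer_instance

-- ===== CLAIM (what is proved, stated in full; the proofs are below) =====
def Claim_equal_intervalos_vacios : Prop := ∀ (indices : List Int), Dom_intervalos_vacios indices → Pre_intervalos_vacios indices → Spec_intervalos_vacios indices (intervalos_vacios indices)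

-- ===== LEMMAS AND PROOFS =====

-- interior gap endpoints of xs, given previous value p
def pvGapsP (p : Int) : List Int → List Int
  | [] => []
  | x :: t => (if x ≠ p + 1 then [p, x] else []) ++ pvGapsP x t

lemma pv_pyGetD_neg_one (a : Int) (t : List Int) :
    PySem.List.pyGetD (a :: t) (-1) 0 = (a :: t).getLastD 0 := by
  simp [PySem.List.pyGetD, PySem.List.pyGet?, PySem.List.pyIdx?]
  rw [List.getLast?_eq_some_getLast (l := a :: t) (by simp), Option.getD_some,
    List.getLast_eq_getElem]
  rfl

-- shift lemma for A's index loop: fold over range 1 m on (y::ys) = fold over range 0 (m-1) on ys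
lemma pv_shift (y : Int) (ys : List Int) (m : Int) (acc : List Int) :
    (PySem.List.pyRange 1 m 1).foldl
      (fun acc k =>
        if PySem.List.pyGetD (y :: ys) (k + 1) 0 ≠ PySem.List.pyGetD (y :: ys) k 0 + 1 then
          acc ++ [PySem.List.pyGetD (y :: ys) k 0, PySem.List.pyGetD (y :: ys) (k + 1) 0]
        else acc) acc
    = (PySem.List.pyRange 0 (m - 1) 1).foldl
      (fun acc k =>
        if PySem.List.pyGetD ys (k + 1) 0 ≠ PySem.List.pyGetD ys k 0 + 1 then
          acc ++ [PySem.List.pyGetD ys k 0, PySem.List.pyGetD ys (k + 1) 0]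
        else acc) acc := by
  rw [PySem.List.pyRange_one 1 m, PySem.List.pyRange_one 0 (m - 1), List.foldl_map, List.foldl_map]
  have hlen : (m - 1 - 0).toNat = (m - 1).toNat := by omega
  rw [hlen]
  apply PySem.List.foldl_congr_mem
  intro acc k _
  have h1 : (1 : Int) + (k : Int) = ((k + 1 : Nat) : Int) := by push_cast; ring
  have h2 : ((k + 1 : Nat) : Int) + 1 = ((k + 2 : Nat) : Int) := by push_cast; ring
  have h3 : (0 : Int) + (k : Int) = ((k : Nat) : Int) := by ring
  have h4 : ((k : Nat) : Int) + 1 = ((k + 1 : Nat) : Int) := by push_cast; ring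
  rw [h1, h3, h2, h4, PySem.List.pyGetD_natCast, PySem.List.pyGetD_natCast,
    PySem.List.pyGetD_natCast, PySem.List.pyGetD_natCast]
  simp

lemma pv_foldA (xs : List Int) : ∀ (a : Int) (acc : List Int),
    (PySem.List.pyRange 0 (((a :: xs).length : Int) - 1) 1).foldl
      (fun acc k =>
        if PySem.List.pyGetD (a :: xs) (k + 1) 0 ≠ PySem.List.pyGetD (a :: xs) k 0 + 1 then
          acc ++ [PySem.List.pyGetD (a :: xs) k 0, PySem.List.pyGetD (a :: xs) (k + 1) 0]
        else acc) acc
    = acc ++ pvGapsP a xs := by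
  induction xs with
  | nil =>
    intro a acc
    simp [pvGapsP]
  | cons b t ih =>
    intro a acc
    have hlt : (0 : Int) < ((a :: b :: t).length : Int) - 1 := by simp
    rw [PySem.List.pyRange_one_cons hlt, List.foldl_cons]
    have e1 : PySem.List.pyGetD (a :: b :: t) ((0 : Int) + 1) 0 = b := by
      have : (0 : Int) + 1 = ((1 : Nat) : Int) := by norm_cast
      rw [this, PySem.List.pyGetD_natCast]; rfl
    have e0 : PySem.List.pyGetD (a :: b :: t) (0 : Int) 0 = a := by
      have : (0 : Int) = ((0 : Nat) : Int) := by norm_cast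
      rw [this, PySem.List.pyGetD_natCast]; rfl
    rw [e1, e0, show (0:Int)+1 = 1 from by ring]
    have hm : ((a :: b :: t).length : Int) - 1 - 1 = ((b :: t).length : Int) - 1 := by
      simp
    rw [pv_shift a (b :: t) (((a :: b :: t).length : Int) - 1), hm, ih b]
    simp [pvGapsP]
    split_ifs <;> simp

lemma pv_foldB (xs : List Int) : ∀ (runs : List (List Int)) (cur : List Int), cur ≠ [] →
    (let st := xs.foldl pvIvStep (runs, cur)
     (if st.2.isEmpty then st.1 else st.1 ++ [st.2]).flatMap (fun r => [r.headD 0, r.getLastD 0]))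
    = runs.flatMap (fun r => [r.headD 0, r.getLastD 0])
      ++ [cur.headD 0] ++ pvGapsP (cur.getLastD 0) xs ++ [xs.getLastD (cur.getLastD 0)] := by
  induction xs with
  | nil =>
    intro runs cur hc
    simp [List.isEmpty_eq_false_iff.mpr hc, pvGapsP, List.getLastD]
  | cons x t ih =>
    intro runs cur hc
    obtain ⟨c, cs, rfl⟩ := List.exists_cons_of_ne_nil hc
    simp only [List.foldl_cons]
    by_cases hx : x = (c :: cs).getLastD 0 + 1
    · have hstep : pvIvStep (runs, c :: cs) x = (runs, (c :: cs) ++ [x]) := by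
        simp [pvIvStep, hx]
      rw [hstep, ih runs ((c :: cs) ++ [x]) (by simp)]
      simp [pvGapsP, hx, -List.getLastD_eq_getLast?, List.getLastD_cons, List.getLastD_concat]
    · replace hx : ¬x = cs.getLast?.getD c + 1 := by
        simpa [List.getLast?_cons] using hx
      have hstep : pvIvStep (runs, c :: cs) x = (runs ++ [c :: cs], [x]) := by
        simp [pvIvStep, List.getLast?_cons, hx]
      rw [hstep, ih (runs ++ [c :: cs]) [x] (by simp)]
      simp [pvGapsP, List.getLast?_cons, hx]

-- ===== VERDICT (by name: the statement is the Claim_ definition above) =====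
theorem intervalos_vacios_spec : Claim_equal_intervalos_vacios := by
  intro indices _ hpre
  unfold Spec_intervalos_vacios
  match indices with
  | [] => exact absurd rfl hpre
  | a :: t =>
    unfold intervalos_vacios intervalos_vacios_alt
    simp only [List.foldl_cons]
    have hstep : pvIvStep ([], []) a = ([], [a]) := by simp [pvIvStep]
    rw [hstep, pv_foldA t a, pv_pyGetD_neg_one, pv_foldB t [] [a] (by simp)]
    simp [-List.getLastD_eq_getLast?, List.getLastD_cons, List.getLastD_nil]
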